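-- pv_equiv track=rewrite | github.com/PhoneticsBug/Code-Workouts | workouts/Algorithm/7. july/jul4th/N으로 표현(Programmers)/N으로 표현.py | solution
-- ===== SOURCE A (Python) =====
-- def solution(N, number):
--     S = [{N}]
--     for  i in range(2, 9):
--         temp = [int(str(N)*i)]
--         for j in range(0, int(i/2)):
--             for x in S[j]:
--                 for y in S[i - j - 2]:
--                     temp.append(x+y)
--                     temp.append(x-y)
--                     temp.append(y-x)
--                     temp.append(x*y)
--                     if x != 0:
--                         temp.append(y//x)
--                     if y != 0:
--                         temp.append(x//y)
--         if number in set(temp):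
--             return i
--         S.append(temp)
--     return -1
-- ===== SOURCE B (Python) =====
-- def solution(N, number):
--     def reach(c):
--         if c == 1:
--             return [N]
--         vals = [int(str(N) * c)]
--         for a in range(1, c):
--             xs = reach(a)
--             ys = reach(c - a)
--             for x in xs:
--                 for y in ys:
--                     vals.append(x + y)
--                     vals.append(x - y)
--                     vals.append(x * y)
--                     if y != 0:
--                         vals.append(x // y)
--
--         return vals
--     for count in range(2, 9):
--         if number in reach(count):
--             return count
--     return -1
-- ===== Notes on version B (the rewrite author's own statement) =====
-- stated objective: alternative
-- what changed: Replaces A's iterative table of per-level duplicate lists built from a half-range of splits with six symmetric operations by a memo-free top-down recursion reach(c) that enumerates the full split range 1..c-1 with only four operations (the reversed subtraction and division come from the symmetric split), keeping no table at all.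
import Mathlib
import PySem

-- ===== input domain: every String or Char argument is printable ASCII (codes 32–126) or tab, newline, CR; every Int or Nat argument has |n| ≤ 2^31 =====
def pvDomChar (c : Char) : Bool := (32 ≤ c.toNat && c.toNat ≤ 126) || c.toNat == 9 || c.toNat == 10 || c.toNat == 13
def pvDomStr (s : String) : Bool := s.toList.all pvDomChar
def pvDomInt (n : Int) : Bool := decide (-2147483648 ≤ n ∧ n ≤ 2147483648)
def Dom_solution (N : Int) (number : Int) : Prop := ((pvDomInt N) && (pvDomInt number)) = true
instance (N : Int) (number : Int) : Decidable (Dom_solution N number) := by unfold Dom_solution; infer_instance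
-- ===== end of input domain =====

-- B re-derives each count-level by memo-free top-down recursion over the FULL split range with
-- four operators, instead of A's iterative table of half-range six-operator passes (objective:
-- alternative — same exact results, not faster).

-- ===== PORT A =====

-- int(str(N)*i) — shared by both ports (both Pythons contain this exact expression);
-- ofChars? is none exactly where Python raises ValueError (N < 0), excluded by Pre_solution.
def pvRepNum (N : Int) (i : Int) : Int :=
  (PySem.Int.ofChars? (List.flatten (List.replicate i.toNat (PySem.Int.toChars N)))).getD 0

-- the six temp.append(...) of A's innermost loop (Python list.append = Array.push)
def pvStepA (t : Array Int) (x y : Int) : Array Int :=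
  let t := t.push (x + y)
  let t := t.push (x - y)
  let t := t.push (y - x)
  let t := t.push (x * y)
  let t := if x ≠ 0 then t.push (PySem.Int.floordiv y x) else t
  if y ≠ 0 then t.push (PySem.Int.floordiv x y) else t

-- one iteration of A's outer 'for i' body building temp; int(i/2) = truncdiv i 2
def pvLevelA (S : List (Array Int)) (N : Int) (i : Int) : Array Int :=
  (PySem.List.pyRange 0 (PySem.Int.truncdiv i 2) 1).foldl (fun t j =>
    (PySem.List.pyGetD S j #[]).foldl (fun t x =>
      (PySem.List.pyGetD S (i - j - 2) #[]).foldl (fun t y => pvStepA t x y) t) t)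
    #[pvRepNum N i]

-- A's loop body; 'number in set(temp)' is membership in temp (set() only dedups);
-- the early 'return i' is the some-state the fold then carries unchanged
def pvLoopA (N number : Int) (st : List (Array Int) × Option Int) (i : Int) :
    List (Array Int) × Option Int :=
  match st.2 with
  | some _ => st
  | none =>
    let temp := pvLevelA st.1 N i
    if temp.contains number then (st.1, some i)
    else (st.1 ++ [temp], none)

-- S = [{N}]: the one-element set {N} holds exactly N
def solution (N : Int) (number : Int) : Int :=
  ((PySem.List.pyRange 2 9 1).foldl (pvLoopA N number) ([#[N]], none)).2.getD (-1)

-- ===== PORT B =====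

-- the four vals.append(...) of B's innermost loop
def pvStepB (t : Array Int) (x y : Int) : Array Int :=
  let t := t.push (x + y)
  let t := t.push (x - y)
  let t := t.push (x * y)
  if y ≠ 0 then t.push (PySem.Int.floordiv x y) else t

-- B's recursive reach(c): values writable with exactly c copies of N (duplicates kept)
def pvReach (N : Int) (c : Int) : Array Int :=
  if c = 1 then #[N]
  else
    (PySem.List.pyRange 1 c 1).attach.foldl (fun vals a =>
      let xs := pvReach N a.1
      let ys := pvReach N (c - a.1)
      xs.foldl (fun vals x => ys.foldl (fun vals y => pvStepB vals x y) vals) vals)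
      #[pvRepNum N c]
termination_by c.toNat
decreasing_by
  · have := (PySem.List.mem_pyRange_one.1 a.2); omega
  · have := (PySem.List.mem_pyRange_one.1 a.2); omega

-- B's driving loop with its early return
def pvLoopB (N number : Int) (acc : Option Int) (count : Int) : Option Int :=
  match acc with
  | some r => some r
  | none => if (pvReach N count).contains number then some count else none

def solution_alt (N : Int) (number : Int) : Int :=
  ((PySem.List.pyRange 2 9 1).foldl (pvLoopB N number) none).getD (-1)

-- ===== PRECONDITION & SPEC =====

-- Pre_ excludes N < 0, on which Python A raises ValueError (int(str(N)*2) parses '-N-N');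
-- A returns normally on every N ≥ 0, all of which Pre_ admits.
def Pre_solution (N : Int) (number : Int) : Prop := 0 ≤ N
instance (N : Int) (number : Int) : Decidable (Pre_solution N number) := by
  unfold Pre_solution; infer_instance

def pvWitness_solution : Int × Int := (5, 12)

def Spec_solution (N : Int) (number : Int) (out : Int) : Prop := out = solution_alt N number
instance (N : Int) (number : Int) (out : Int) : Decidable (Spec_solution N number out) := by
  unfold Spec_solution; infer_instance

-- ===== CLAIM (what is proved, stated in full; the proofs are below) =====
def Claim_equal_solution : Prop := ∀ (N : Int) (number : Int),
  Dom_solution N number → Pre_solution N number → Spec_solution N number (solution N number)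

-- ===== LEMMAS AND PROOFS =====

-- the value sets produced by the innermost loops, as predicates
def pvOp6 (x y v : Int) : Prop :=
  v = x + y ∨ v = x - y ∨ v = y - x ∨ v = x * y ∨
  (x ≠ 0 ∧ v = PySem.Int.floordiv y x) ∨ (y ≠ 0 ∧ v = PySem.Int.floordiv x y)

def pvOp4 (x y v : Int) : Prop :=
  v = x + y ∨ v = x - y ∨ v = x * y ∨ (y ≠ 0 ∧ v = PySem.Int.floordiv x y)

lemma pvOp6_iff (x y v : Int) : pvOp6 x y v ↔ pvOp4 x y v ∨ pvOp4 y x v := by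
  unfold pvOp6 pvOp4
  constructor
  · rintro (h | h | h | h | h | h)
    · exact Or.inl (Or.inl h)
    · exact Or.inl (Or.inr (Or.inl h))
    · exact Or.inr (Or.inr (Or.inl h))
    · exact Or.inl (Or.inr (Or.inr (Or.inl h)))
    · exact Or.inr (Or.inr (Or.inr (Or.inr h)))
    · exact Or.inl (Or.inr (Or.inr (Or.inr h)))
  · rintro ((h | h | h | h) | (h | h | h | h))
    · exact Or.inl h
    · exact Or.inr (Or.inl h)
    · exact Or.inr (Or.inr (Or.inr (Or.inl h)))
    · exact Or.inr (Or.inr (Or.inr (Or.inr (Or.inr h))))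
    · exact Or.inl (by rw [Int.add_comm] at h; exact h)
    · exact Or.inr (Or.inr (Or.inl h))
    · exact Or.inr (Or.inr (Or.inr (Or.inl (by rw [Int.mul_comm] at h; exact h))))
    · exact Or.inr (Or.inr (Or.inr (Or.inr (Or.inl h))))

-- membership through a fold whose step adds exactly the P-values (List iteration)
lemma pv_mem_foldl {α β : Type} (memb : β → Int → Prop) (f : β → α → β) (P : α → Int → Prop)
    (hf : ∀ t a v, memb (f t a) v ↔ memb t v ∨ P a v) :
    ∀ (l : List α) (t : β) (v : Int),
      memb (l.foldl f t) v ↔ memb t v ∨ ∃ a ∈ l, P a v := by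
  intro l
  induction l with
  | nil => simp
  | cons a l ih =>
    intro t v
    simp only [List.foldl_cons, ih, hf, List.mem_cons]
    constructor
    · rintro ((h | h) | ⟨b, hb, hP⟩)
      · exact Or.inl h
      · exact Or.inr ⟨a, Or.inl rfl, h⟩
      · exact Or.inr ⟨b, Or.inr hb, hP⟩
    · rintro (h | ⟨b, (rfl | hb), hP⟩)
      · exact Or.inl (Or.inl h)
      · exact Or.inl (Or.inr hP)
      · exact Or.inr ⟨b, hb, hP⟩

-- same, iterating an Array
lemma pv_mem_foldl_arr {β : Type} (memb : β → Int → Prop) (f : β → Int → β) (P : Int → Int → Prop)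
    (hf : ∀ t a v, memb (f t a) v ↔ memb t v ∨ P a v) (arr : Array Int) (t : β) (v : Int) :
    memb (arr.foldl f t) v ↔ memb t v ∨ ∃ a ∈ arr, P a v := by
  rw [← Array.foldl_toList, pv_mem_foldl memb f P hf]
  simp

lemma pv_mem_stepA (t : Array Int) (x y v : Int) :
    v ∈ pvStepA t x y ↔ v ∈ t ∨ pvOp6 x y v := by
  unfold pvStepA pvOp6
  split_ifs with h1 h2 <;> simp [Array.mem_push] <;> tauto

lemma pv_mem_stepB (t : Array Int) (x y v : Int) :
    v ∈ pvStepB t x y ↔ v ∈ t ∨ pvOp4 x y v := by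
  unfold pvStepB pvOp4
  split_ifs with h1 <;> simp [Array.mem_push] <;> tauto

lemma pv_mem_levelA (S : List (Array Int)) (N i v : Int) :
    v ∈ pvLevelA S N i ↔ v = pvRepNum N i ∨
      ∃ j, (0 ≤ j ∧ j < PySem.Int.truncdiv i 2) ∧
        ∃ x ∈ PySem.List.pyGetD S j #[],
          ∃ y ∈ PySem.List.pyGetD S (i - j - 2) #[], pvOp6 x y v := by
  unfold pvLevelA
  refine Iff.trans (pv_mem_foldl (fun (t : Array Int) v => v ∈ t) _
    (fun j v => ∃ x ∈ PySem.List.pyGetD S j #[],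
      ∃ y ∈ PySem.List.pyGetD S (i - j - 2) #[], pvOp6 x y v) ?_ _ _ _) ?_
  · intro t j v
    exact pv_mem_foldl_arr (fun t v => v ∈ t) _
      (fun x v => ∃ y ∈ PySem.List.pyGetD S (i - j - 2) #[], pvOp6 x y v)
      (fun t x v => pv_mem_foldl_arr (fun t v => v ∈ t) _ (fun y v => pvOp6 x y v)
        (fun t y v => pv_mem_stepA t x y v) _ t v) _ t v
  · simp [PySem.List.mem_pyRange_one]

lemma pv_mem_reach (N c v : Int) (hc : c ≠ 1) :
    v ∈ pvReach N c ↔ v = pvRepNum N c ∨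
      ∃ a, (1 ≤ a ∧ a < c) ∧
        ∃ x ∈ pvReach N a, ∃ y ∈ pvReach N (c - a), pvOp4 x y v := by
  rw [pvReach, if_neg hc]
  refine Iff.trans (pv_mem_foldl (fun (t : Array Int) v => v ∈ t) _
    (fun (a : {x // x ∈ PySem.List.pyRange 1 c 1}) v =>
      ∃ x ∈ pvReach N a.1, ∃ y ∈ pvReach N (c - a.1), pvOp4 x y v) ?_ _ _ _) ?_
  · intro t a v
    exact pv_mem_foldl_arr (fun t v => v ∈ t) _
      (fun x v => ∃ y ∈ pvReach N (c - a.1), pvOp4 x y v)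
      (fun t x v => pv_mem_foldl_arr (fun t v => v ∈ t) _ (fun y v => pvOp4 x y v)
        (fun t y v => pv_mem_stepB t x y v) _ t v) _ t v
  · simp [PySem.List.mem_pyRange_one]

-- half-range six-operator enumeration = full-range four-operator enumeration
lemma pv_half_full (i v : Int) (R : Int → Int → Prop) :
    (∃ j, (0 ≤ j ∧ j < i / 2) ∧ ∃ x, R (j + 1) x ∧ ∃ y, R (i - j - 1) y ∧ pvOp6 x y v) ↔
    (∃ a, (1 ≤ a ∧ a < i) ∧ ∃ x, R a x ∧ ∃ y, R (i - a) y ∧ pvOp4 x y v) := by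
  constructor
  · rintro ⟨j, ⟨hj0, hj⟩, x, hx, y, hy, hop⟩
    rcases (pvOp6_iff x y v).1 hop with h4 | h4
    · refine ⟨j + 1, ⟨by omega, by omega⟩, x, hx, y, ?_, h4⟩
      have e : i - (j + 1) = i - j - 1 := by ring
      rw [e]; exact hy
    · refine ⟨i - j - 1, ⟨by omega, by omega⟩, y, hy, x, ?_, h4⟩
      have e : i - (i - j - 1) = j + 1 := by ring
      rw [e]; exact hx
  · rintro ⟨a, ⟨ha1, hai⟩, x, hx, y, hy, hop⟩
    by_cases hle : a ≤ i / 2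
    · refine ⟨a - 1, ⟨by omega, by omega⟩, x, ?_, y, ?_, (pvOp6_iff x y v).2 (Or.inl hop)⟩
      · have e : a - 1 + 1 = a := by ring
        rw [e]; exact hx
      · have e : i - (a - 1) - 1 = i - a := by ring
        rw [e]; exact hy
    · refine ⟨i - a - 1, ⟨by omega, by omega⟩, y, ?_, x, ?_, (pvOp6_iff y x v).2 (Or.inr hop)⟩
      · have e : i - a - 1 + 1 = i - a := by ring
        rw [e]; exact hy
      · have e : i - (i - a - 1) - 1 = a := by ring
        rw [e]; exact hx

-- A's level i equals B's reach i, given S's entries match the lower reaches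
lemma pv_level_equiv (S : List (Array Int)) (N i : Int) (h2 : 2 ≤ i)
    (hlen : (S.length : Int) = i - 1)
    (hmem : ∀ k : Int, 0 ≤ k → k < i - 1 →
      ∀ x, x ∈ PySem.List.pyGetD S k #[] ↔ x ∈ pvReach N (k + 1)) :
    ∀ v, v ∈ pvLevelA S N i ↔ v ∈ pvReach N i := by
  intro v
  rw [pv_mem_levelA, pv_mem_reach N i v (by omega)]
  apply or_congr Iff.rfl
  simp only [PySem.Int.truncdiv]
  rw [Int.tdiv_eq_ediv_of_nonneg (by omega : (0:Int) ≤ i)]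
  rw [← pv_half_full i v (fun c x => x ∈ pvReach N c)]
  constructor
  · rintro ⟨j, ⟨hj0, hj⟩, x, hx, y, hy, hop⟩
    have hj' : j < i - 1 := by omega
    have hj2 : i - j - 2 < i - 1 := by omega
    have hj2' : 0 ≤ i - j - 2 := by omega
    refine ⟨j, ⟨hj0, hj⟩, x, (hmem j hj0 hj' x).1 hx, y, ?_, hop⟩
    have e : i - j - 2 + 1 = i - j - 1 := by ring
    rw [← e]
    exact (hmem _ hj2' hj2 y).1 hy
  · rintro ⟨j, ⟨hj0, hj⟩, x, hx, y, hy, hop⟩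
    have hj' : j < i - 1 := by omega
    have hj2 : i - j - 2 < i - 1 := by omega
    have hj2' : 0 ≤ i - j - 2 := by omega
    refine ⟨j, ⟨hj0, hj⟩, x, (hmem j hj0 hj' x).2 hx, y, ?_, hop⟩
    apply (hmem _ hj2' hj2 y).2
    have e : i - j - 2 + 1 = i - j - 1 := by ring
    rw [e]
    exact hy

lemma pv_loopA_some (N number : Int) (l : List Int) (S : List (Array Int)) (r : Int) :
    l.foldl (pvLoopA N number) (S, some r) = (S, some r) := by
  induction l with
  | nil => rfl
  | cons a l ih => simpa [pvLoopA] using ih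

lemma pv_loopB_some (N number : Int) (l : List Int) (r : Int) :
    l.foldl (pvLoopB N number) (some r) = some r := by
  induction l with
  | nil => rfl
  | cons a l ih => simpa [pvLoopB] using ih

-- the two driving loops agree from any pair of matching states
lemma pv_loop_sim (N number : Int) :
    ∀ (n : Nat) (m : Int), m + n = 9 → 2 ≤ m →
      ∀ S : List (Array Int), (S.length : Int) = m - 1 →
        (∀ k : Int, 0 ≤ k → k < m - 1 →
          ∀ x, x ∈ PySem.List.pyGetD S k #[] ↔ x ∈ pvReach N (k + 1)) →
        ((PySem.List.pyRange m 9 1).foldl (pvLoopA N number) (S, none)).2 =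
          (PySem.List.pyRange m 9 1).foldl (pvLoopB N number) none := by
  intro n
  induction n with
  | zero =>
    intro m hm _ S _ _
    have : (9:Int) ≤ m := by omega
    rw [PySem.List.pyRange_one_eq_nil (by omega)]
    rfl
  | succ n ih =>
    intro m hm h2 S hlen hmem
    rw [PySem.List.pyRange_one_cons (by omega : m < 9)]
    have hlev := pv_level_equiv S N m h2 hlen hmem
    simp only [List.foldl_cons]
    by_cases hin : number ∈ pvReach N m
    · have hinA : number ∈ pvLevelA S N m := (hlev number).2 hin
      rw [show pvLoopA N number (S, none) m = (S, some m) by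
        simp [pvLoopA, hinA]]
      rw [show pvLoopB N number none m = some m by
        simp [pvLoopB, hin]]
      rw [pv_loopA_some, pv_loopB_some]
    · have hinA : number ∉ pvLevelA S N m := fun h => hin ((hlev number).1 h)
      rw [show pvLoopA N number (S, none) m = (S ++ [pvLevelA S N m], none) by
        simp [pvLoopA, hinA]]
      rw [show pvLoopB N number none m = none by
        simp [pvLoopB, hin]]
      apply ih (m + 1) (by omega) (by omega)
      · simp only [List.length_append, List.length_cons, List.length_nil]
        push_cast
        omega
      · intro k hk0 hk x
        rcases lt_or_ge k (S.length : Int) with hlt | hge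
        · have hgd : PySem.List.pyGetD (S ++ [pvLevelA S N m]) k #[] =
              PySem.List.pyGetD S k #[] := by
            rw [PySem.List.pyGetD_eq_getElem _ _ hk0 (by simp; omega),
              PySem.List.pyGetD_eq_getElem _ _ hk0 (by omega)]
            exact List.getElem_append_left (by omega)
          rw [hgd]
          exact hmem k hk0 (by omega) x
        · have hk' : k = (S.length : Int) := by omega
          have hgd : PySem.List.pyGetD (S ++ [pvLevelA S N m]) k #[] = pvLevelA S N m := by
            rw [PySem.List.pyGetD_eq_getElem _ _ hk0 (by simp; omega)]
            have ht : k.toNat = S.length := by omega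
            simp [ht]
          rw [hgd]
          have hm' : k + 1 = m := by omega
          rw [hm']
          exact hlev x

-- ===== VERDICT (by name: the statement is the Claim_ definition above) =====
theorem solution_spec : Claim_equal_solution := by
  intro N number _ _
  unfold Spec_solution solution solution_alt
  have h := pv_loop_sim N number 7 2 (by norm_num) (by norm_num) [#[N]] (by simp)
    (by
      intro k hk0 hk x
      have hk' : k = 0 := by omega
      subst hk'
      rw [show PySem.List.pyGetD [#[N]] 0 #[] = #[N] from rfl]
      rw [show pvReach N (0 + 1) = #[N] by rw [pvReach]; simp])
  rw [h]
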